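-- pv_equiv track=rewrite | github.com/pomneii/BplusTree-Project-OODs | Recursion/pop_mood.py | sort_lst
-- ===== SOURCE A (Python) =====
-- def sort_lst(lst) :
--     for element in lst :
--         if not element.isdigit() or len(element) > 1 :
--             return None
--
--     def recursion_sort(current, remaining) :
--         if current :
--             result.append(current)
--
--         for i in range(len(remaining)) :
--             recursion_sort(current + remaining[i], remaining[:i] + remaining[i + 1:])
--
--     result = []
--     recursion_sort("", lst)
--     result = sorted(list(set([int(e) for e in result])))
--     return result
-- ===== SOURCE B (Python) =====
-- def sort_lst(lst):
--     for element in lst: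
--         if not element.isdigit() or len(element) > 1:
--             return None
--
--     counts = {}
--     for e in lst:
--         counts[e] = counts.get(e, 0) + 1
--
--     out = []
--     level = {""}
--     for _ in range(len(lst)):
--         nxt = set()
--         for w in level:
--             for d, c in counts.items():
--                 if w.count(d) < c:
--                     nxt.add(w + d)
--         out.extend(nxt)
--         level = nxt
--     return sorted(set(int(w) for w in out))
-- ===== Notes on version B (the rewrite author's own statement) =====
-- stated objective: alternative
-- what changed: A backtracks over every ordered arrangement of positions of the remaining list and deduplicates at the end; B never permutes: it builds a digit-count table once and grows the set of DISTINCT words level by level (length 1..n), extending a word w by digit d only while w.count(d) stays below d's multiplicity, so each distinct word is produced once.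
import Mathlib
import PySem

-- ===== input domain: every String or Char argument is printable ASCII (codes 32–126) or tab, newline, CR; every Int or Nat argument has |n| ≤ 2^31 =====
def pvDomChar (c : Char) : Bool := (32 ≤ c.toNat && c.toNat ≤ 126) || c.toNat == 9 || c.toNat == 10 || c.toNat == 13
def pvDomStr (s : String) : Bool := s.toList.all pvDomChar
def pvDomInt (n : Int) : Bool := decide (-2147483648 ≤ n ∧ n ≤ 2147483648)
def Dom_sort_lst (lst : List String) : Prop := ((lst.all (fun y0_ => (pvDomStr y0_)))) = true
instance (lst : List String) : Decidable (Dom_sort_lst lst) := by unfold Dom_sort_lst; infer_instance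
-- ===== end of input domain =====

-- B replaces A's backtracking over every ordered arrangement of positions by a level-by-level
-- growth of the set of DISTINCT words, extending a word by a digit only while that digit's
-- count in the word stays below its multiplicity in the input (objective: alternative).

-- ===== PORT A =====

-- int(e): e is always a nonempty digit string where it is applied, so ofChars? never returns none
def pvInt (e : List Char) : Int := (PySem.Int.ofChars? e).getD 0

-- remaining[:i] + remaining[i+1:] drops exactly position i (cited by the termination proofs below)
theorem pv_slice_eraseIdx (rem : List String) (i : Nat) :
    PySem.List.slice rem none (some (i : Int)) ++
      PySem.List.slice rem (some ((i : Int) + 1)) none = rem.eraseIdx i := by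
  have h1 := PySem.List.slice_to_natCast rem i
  have h2 : PySem.List.slice rem (some ((i : Int) + 1)) none = rem.drop (i + 1) := by
    have := PySem.List.slice_from_natCast rem (i + 1)
    simpa using this
  rw [h1, h2]
  exact (List.eraseIdx_eq_take_drop_succ rem i).symm

theorem pv_slice_lt {rem : List String} {i : Nat} (h : i < rem.length) :
    (PySem.List.slice rem none (some (i : Int)) ++
      PySem.List.slice rem (some ((i : Int) + 1)) none).length < rem.length := by
  rw [pv_slice_eraseIdx, List.length_eraseIdx_of_lt h]
  omega

theorem pv_sub_succ_lt {n i : Nat} (h : i < n) : n - (i + 1) < n - i := by omega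

-- the 'for i in range(len(remaining))' loop of recursion_sort; the recursive call
-- 'recursion_sort(current + remaining[i], remaining[:i] + remaining[i+1:])' is inlined
-- (its body = append the new current if non-empty, then run this loop from index 0)
def pvGoA (current : List Char) (remaining : List String) (i : Nat) (acc : List (List Char)) :
    List (List Char) :=
  if h : i < remaining.length then
    pvGoA current remaining (i + 1)
      (pvGoA (current ++ (remaining[i]).toList)
        (PySem.List.slice remaining none (some (i : Int)) ++
          PySem.List.slice remaining (some ((i : Int) + 1)) none)
        0
        (if current ++ (remaining[i]).toList = [] then acc
         else acc ++ [current ++ (remaining[i]).toList]))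
  else acc
termination_by (remaining.length, remaining.length - i)
decreasing_by
  · exact Prod.Lex.left _ _ (pv_slice_lt h)
  · exact Prod.Lex.right _ (pv_sub_succ_lt h)

-- recursion_sort(current, remaining): append current (if non-empty), then the index loop
def pvRecA (current : List Char) (remaining : List String) (acc : List (List Char)) :
    List (List Char) :=
  pvGoA current remaining 0 (if current = [] then acc else acc ++ [current])

def sort_lst (lst : List String) : Option (List Int) :=
  if lst.all (fun element =>
      PySem.Str.strIsdigit element && !(decide ((1 : Int) < PySem.Str.len element))) then
    let result := pvRecA [] lst []
    some (PySem.List.sorted (PySem.Set.ofList (result.map pvInt)) (fun x => x) false)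
  else none

-- ===== PORT B =====

-- counts[e] = counts.get(e, 0) + 1 over lst
def pvCounts (lst : List String) : PySem.Dict String Int :=
  lst.foldl (fun d e => d.insert e (d.getD e 0 + 1)) PySem.Dict.empty

-- one pass of the 'for _ in range(len(lst))' loop: build nxt from level, extend out, replace level
def pvStepB (counts : PySem.Dict String Int)
    (st : List (List Char) × PySem.Set (List Char)) :
    List (List Char) × PySem.Set (List Char) :=
  let nxt := st.2.foldl (fun nxt w =>
      counts.items.foldl (fun nxt dc =>
          if ((PySem.Chars.count w dc.1.toList : Int) < dc.2) then
            PySem.Set.add nxt (w ++ dc.1.toList)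
          else nxt) nxt)
    PySem.Set.empty
  (st.1 ++ nxt, nxt)

def sort_lst_alt (lst : List String) : Option (List Int) :=
  if lst.all (fun element =>
      PySem.Str.strIsdigit element && !(decide ((1 : Int) < PySem.Str.len element))) then
    let counts := pvCounts lst
    let st := (List.range lst.length).foldl (fun st _ => pvStepB counts st)
      ([], PySem.Set.ofList [[]])
    some (PySem.List.sorted (PySem.Set.ofList (st.1.map pvInt)) (fun x => x) false)
  else none

-- ===== PRECONDITION & SPEC =====
def Spec_sort_lst (lst : List String) (out : Option (List Int)) : Prop := out = sort_lst_alt lst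
instance (lst : List String) (out : Option (List Int)) : Decidable (Spec_sort_lst lst out) := by
  unfold Spec_sort_lst; infer_instance

-- ===== CLAIM (what is proved, stated in full; the proofs are below) =====
def Claim_equal_sort_lst : Prop := ∀ (lst : List String), Dom_sort_lst lst → Spec_sort_lst lst (sort_lst lst)

-- ===== LEMMAS AND PROOFS =====

theorem pvRecA_eq (cur : List Char) (rem : List String) (acc : List (List Char)) :
    pvGoA cur rem 0 (if cur = [] then acc else acc ++ [cur]) = pvRecA cur rem acc := rfl

-- pvSR cur rem s : starting from the word cur with multiset of strings rem left,
-- the word s is producible by appending remaining elements one at a time (at least one).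
inductive pvSR : List Char → List String → List Char → Prop where
  | base {cur : List Char} {rem : List String} (e : String) (he : e ∈ rem) :
      pvSR cur rem (cur ++ e.toList)
  | step {cur : List Char} {rem : List String} {s : List Char} (e : String) (he : e ∈ rem)
      (h : pvSR (cur ++ e.toList) (rem.erase e) s) : pvSR cur rem s

theorem pvSR_perm {cur : List Char} {rem rem' : List String} {s : List Char}
    (hp : rem.Perm rem') (h : pvSR cur rem s) : pvSR cur rem' s := by
  induction h generalizing rem' with
  | base e he => exact pvSR.base e (hp.mem_iff.mp he)
  | step e he h ih => exact pvSR.step e (hp.mem_iff.mp he) (ih (hp.erase e))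

theorem pvSR_nil {cur s : List Char} : ¬ pvSR cur [] s := by
  intro h
  cases h with
  | base e he => simp at he
  | step e he h => simp at he

theorem pvSR_iff (cur : List Char) (rem : List String) (s : List Char) :
    pvSR cur rem s ↔
      ∃ e ∈ rem, s = cur ++ e.toList ∨ pvSR (cur ++ e.toList) (rem.erase e) s := by
  constructor
  · intro h
    cases h with
    | base e he => exact ⟨e, he, Or.inl rfl⟩
    | step e he h => exact ⟨e, he, Or.inr h⟩
  · rintro ⟨e, he, (rfl | h)⟩
    · exact pvSR.base e he
    · exact pvSR.step e he h

-- removing position i removes one occurrence of the value l[i]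
theorem pv_eraseIdx_perm : ∀ (l : List String) (i : Nat) (h : i < l.length),
    (l.eraseIdx i).Perm (l.erase l[i]) := by
  intro l
  induction l with
  | nil => intro i h; simp at h
  | cons x xs ih =>
    intro i h
    cases i with
    | zero => simp [List.eraseIdx]
    | succ i =>
      have h' : i < xs.length := by simpa using h
      have hget : (x :: xs)[i + 1] = xs[i] := by simp
      rw [hget, List.eraseIdx_cons_succ]
      by_cases hx : x = xs[i]
      · have hmem : x ∈ xs := hx ▸ List.getElem_mem h'
        rw [← hx, List.erase_cons_head]
        have t1 : (x :: xs.eraseIdx i).Perm (x :: xs.erase x) := by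
          have := (ih i h').cons x
          rwa [← hx] at this
        exact t1.trans (List.perm_cons_erase hmem).symm
      · have hne' : ((x :: xs).erase xs[i]) = x :: xs.erase xs[i] :=
          List.erase_cons_tail (by simp [hx])
        rw [hne']
        exact (ih i h').cons x

-- membership characterisation of A's recursion_sort (and of its inner index loop)
theorem pv_memA : ∀ (n : Nat) (rem : List String), rem.length ≤ n →
    (∀ e ∈ rem, e.toList ≠ []) →
    ((∀ (cur : List Char) (i : Nat) (acc : List (List Char)) (s : List Char),
        s ∈ pvGoA cur rem i acc ↔ s ∈ acc ∨ ∃ j, ∃ (hj : j < rem.length), i ≤ j ∧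
          (s = cur ++ (rem[j]).toList ∨ pvSR (cur ++ (rem[j]).toList) (rem.eraseIdx j) s)) ∧
     (∀ (cur : List Char) (acc : List (List Char)) (s : List Char),
        s ∈ pvRecA cur rem acc ↔ s ∈ acc ∨ (cur ≠ [] ∧ s = cur) ∨ pvSR cur rem s)) := by
  intro n
  induction n with
  | zero =>
    intro rem hlen hne
    have hnil : rem = [] := List.length_eq_zero_iff.mp (Nat.le_zero.mp hlen)
    subst hnil
    constructor
    · intro cur i acc s
      rw [pvGoA]
      simp
    · intro cur acc s
      rw [← pvRecA_eq, pvGoA, dif_neg (by simp : ¬ (0 : Nat) < ([] : List String).length)]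
      have := @pvSR_nil cur s
      split_ifs with hc
      · subst hc; simp [this]
      · simp [hc, this]
  | succ n ih =>
    intro rem hlen hne
    have hgo : ∀ (k : Nat) (i : Nat), rem.length - i ≤ k →
        ∀ (cur : List Char) (acc : List (List Char)) (s : List Char),
        s ∈ pvGoA cur rem i acc ↔ s ∈ acc ∨ ∃ j, ∃ (hj : j < rem.length), i ≤ j ∧
          (s = cur ++ (rem[j]).toList ∨ pvSR (cur ++ (rem[j]).toList) (rem.eraseIdx j) s) := by
      intro k
      induction k with
      | zero =>
        intro i hi cur acc s
        have hni : ¬ i < rem.length := by omega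
        rw [pvGoA, dif_neg hni]
        constructor
        · intro hs; exact Or.inl hs
        · rintro (hs | ⟨j, hj, hij, -⟩)
          · exact hs
          · omega
      | succ k ihk =>
        intro i hi cur acc s
        rw [pvGoA]
        by_cases h : i < rem.length
        · rw [dif_pos h, pv_slice_eraseIdx, pvRecA_eq]
          have hlen' : (rem.eraseIdx i).length ≤ n := by
            have := List.length_eraseIdx_of_lt h
            omega
          have hne' : ∀ e ∈ rem.eraseIdx i, e.toList ≠ [] :=
            fun e he => hne e (List.mem_of_mem_eraseIdx he)
          have hrec := (ih (rem.eraseIdx i) hlen' hne').2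
          rw [ihk (i + 1) (by omega), hrec]
          have hw : cur ++ (rem[i]).toList ≠ [] := by
            have := hne rem[i] (List.getElem_mem h)
            simp [this]
          constructor
          · rintro ((hs | ⟨-, rfl⟩ | hsr) | ⟨j, hj, hij, hx⟩)
            · exact Or.inl hs
            · exact Or.inr ⟨i, h, le_refl i, Or.inl rfl⟩
            · exact Or.inr ⟨i, h, le_refl i, Or.inr hsr⟩
            · exact Or.inr ⟨j, hj, by omega, hx⟩
          · rintro (hs | ⟨j, hj, hij, hx⟩)
            · exact Or.inl (Or.inl hs)
            · by_cases hji : j = i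
              · subst hji
                rcases hx with rfl | hsr
                · exact Or.inl (Or.inr (Or.inl ⟨hw, rfl⟩))
                · exact Or.inl (Or.inr (Or.inr hsr))
              · exact Or.inr ⟨j, hj, by omega, hx⟩
        · rw [dif_neg h]
          constructor
          · intro hs; exact Or.inl hs
          · rintro (hs | ⟨j, hj, hij, -⟩)
            · exact hs
            · omega
    refine ⟨fun cur i acc s => hgo rem.length i (by omega) cur acc s, ?_⟩
    intro cur acc s
    rw [← pvRecA_eq, hgo rem.length 0 (by omega)]
    have hacc : s ∈ (if cur = [] then acc else acc ++ [cur]) ↔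
        s ∈ acc ∨ (cur ≠ [] ∧ s = cur) := by
      split_ifs with hc <;> simp [hc, eq_comm]
    rw [hacc]
    constructor
    · rintro ((hs | ⟨hc, rfl⟩) | ⟨j, hj, -, hx⟩)
      · exact Or.inl hs
      · exact Or.inr (Or.inl ⟨hc, rfl⟩)
      · rcases hx with rfl | hsr
        · exact Or.inr (Or.inr (pvSR.base rem[j] (List.getElem_mem hj)))
        · exact Or.inr (Or.inr (pvSR.step rem[j] (List.getElem_mem hj)
            (pvSR_perm (pv_eraseIdx_perm rem j hj) hsr)))
    · rintro (hs | ⟨hc, rfl⟩ | hsr)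
      · exact Or.inl (Or.inl hs)
      · exact Or.inl (Or.inr ⟨hc, rfl⟩)
      · rcases (pvSR_iff cur rem s).mp hsr with ⟨e, he, hx⟩
        obtain ⟨j, hj, rfl⟩ := List.mem_iff_getElem.mp he
        refine Or.inr ⟨j, hj, Nat.zero_le j, ?_⟩
        rcases hx with rfl | hsr'
        · exact Or.inl rfl
        · exact Or.inr (pvSR_perm (pv_eraseIdx_perm rem j hj).symm hsr')

-- ---------- B-side characterisation ----------

-- the char population of the input (each element contributes its characters)
def pvChars (lst : List String) : List Char := lst.flatMap (fun e => e.toList)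

-- s uses no character more often than the input supplies it
def pvBounds (lst : List String) (s : List Char) : Prop :=
  ∀ c, s.count c ≤ (pvChars lst).count c

-- Python's w.count(d) for a one-character d is the character count
theorem pv_count_go_single (c : Char) : ∀ (fuel : Nat) (l : List Char) (acc : Nat),
    l.length ≤ fuel → PySem.Chars.count.go [c] fuel l acc = acc + l.count c := by
  intro fuel
  induction fuel with
  | zero =>
    intro l acc hl
    have : l = [] := List.length_eq_zero_iff.mp (Nat.le_zero.mp hl)
    subst this
    simp [PySem.Chars.count.go]
  | succ fuel ih =>
    intro l acc hl
    cases l with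
    | nil => simp [PySem.Chars.count.go]
    | cons h t =>
      by_cases hc : c = h
      · subst hc
        rw [PySem.Chars.count.go]
        simp only [List.isPrefixOf, BEq.rfl, Bool.true_and, List.length_cons, List.length_nil,
          List.drop_succ_cons, List.drop_zero, if_true]
        rw [ih t (acc + 1) (by simpa using hl)]
        simp
        omega
      · rw [PySem.Chars.count.go]
        have hpre : ([c].isPrefixOf (h :: t)) = false := by
          simp [List.isPrefixOf, hc]
        rw [hpre]
        simp only [if_neg (by simp : ¬ (false = true))]
        rw [ih t acc (by simpa using hl)]
        simp [Ne.symm hc]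

theorem pv_count_single (w : List Char) (c : Char) :
    PySem.Chars.count w [c] = w.count c := by
  rw [PySem.Chars.count]
  simp only [List.isEmpty_cons, if_neg (by simp : ¬ (false = true))]
  simpa using pv_count_go_single c w.length w 0 le_rfl

-- membership in the inner 'for d, c in counts.items()' fold
theorem pv_inner_mem (w : List Char) (items : List (String × Int))
    (init : PySem.Set (List Char)) (s : List Char) :
    s ∈ items.foldl (fun nxt dc =>
        if ((PySem.Chars.count w dc.1.toList : Int) < dc.2) then
          PySem.Set.add nxt (w ++ dc.1.toList)
        else nxt) init ↔
      s ∈ init ∨ ∃ dc ∈ items,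
        ((PySem.Chars.count w dc.1.toList : Int) < dc.2) ∧ s = w ++ dc.1.toList := by
  induction items generalizing init with
  | nil => simp
  | cons dc rest ih =>
    simp only [List.foldl_cons]
    rw [ih]
    by_cases hp : ((PySem.Chars.count w dc.1.toList : Int) < dc.2)
    · rw [if_pos hp, ]
      constructor
      · rintro (hs | hx)
        · rcases (PySem.Set.mem_add init (w ++ dc.1.toList) s).mp hs with hs | rfl
          · exact Or.inl hs
          · exact Or.inr ⟨dc, List.mem_cons_self, hp, rfl⟩
        · obtain ⟨d', hd', hx⟩ := hx
          exact Or.inr ⟨d', List.mem_cons_of_mem dc hd', hx⟩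
      · rintro (hs | ⟨d', hd', hcond, rfl⟩)
        · exact Or.inl ((PySem.Set.mem_add init _ s).mpr (Or.inl hs))
        · rcases List.mem_cons.mp hd' with rfl | hd'
          · exact Or.inl ((PySem.Set.mem_add init _ _).mpr (Or.inr rfl))
          · exact Or.inr ⟨d', hd', hcond, rfl⟩
    · rw [if_neg hp]
      constructor
      · rintro (hs | ⟨d', hd', hx⟩)
        · exact Or.inl hs
        · exact Or.inr ⟨d', List.mem_cons_of_mem dc hd', hx⟩
      · rintro (hs | ⟨d', hd', hcond, rfl⟩)
        · exact Or.inl hs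
        · rcases List.mem_cons.mp hd' with rfl | hd'
          · exact absurd hcond hp
          · exact Or.inr ⟨d', hd', hcond, rfl⟩

-- membership in the outer 'for w in level' fold
theorem pv_outer_mem (items : List (String × Int)) (lvl : List (List Char))
    (init : PySem.Set (List Char)) (s : List Char) :
    s ∈ lvl.foldl (fun nxt w =>
        items.foldl (fun nxt dc =>
            if ((PySem.Chars.count w dc.1.toList : Int) < dc.2) then
              PySem.Set.add nxt (w ++ dc.1.toList)
            else nxt) nxt) init ↔
      s ∈ init ∨ ∃ w ∈ lvl, ∃ dc ∈ items,
        ((PySem.Chars.count w dc.1.toList : Int) < dc.2) ∧ s = w ++ dc.1.toList := by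
  induction lvl generalizing init with
  | nil => simp
  | cons w rest ih =>
    simp only [List.foldl_cons]
    rw [ih]
    rw [pv_inner_mem]
    constructor
    · rintro ((hs | hx) | ⟨w', hw', hx⟩)
      · exact Or.inl hs
      · exact Or.inr ⟨w, List.mem_cons_self, hx⟩
      · exact Or.inr ⟨w', List.mem_cons_of_mem w hw', hx⟩
    · rintro (hs | ⟨w', hw', hx⟩)
      · exact Or.inl (Or.inl hs)
      · rcases List.mem_cons.mp hw' with rfl | hw'
        · exact Or.inl (Or.inr hx)
        · exact Or.inr ⟨w', hw', hx⟩

-- every element of lst is a single character (the validated case)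
def pvSingle (lst : List String) : Prop := ∀ e ∈ lst, ∃ c, e.toList = [c]

theorem pv_chars_length {lst : List String} (hs : pvSingle lst) :
    (pvChars lst).length = lst.length := by
  induction lst with
  | nil => rfl
  | cons e rest ih =>
    obtain ⟨c, hc⟩ := hs e List.mem_cons_self
    have := ih (fun e' he' => hs e' (List.mem_cons_of_mem e he'))
    simp [pvChars, hc] at this ⊢
    omega

theorem pv_chars_count {lst : List String} (hs : pvSingle lst) {d : String} {c : Char}
    (hd : d.toList = [c]) : (pvChars lst).count c = lst.count d := by
  induction lst with
  | nil => rfl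
  | cons e rest ih =>
    obtain ⟨ce, hce⟩ := hs e List.mem_cons_self
    have ihr := ih (fun e' he' => hs e' (List.mem_cons_of_mem e he'))
    have hiff : (e = d) ↔ (ce = c) := by
      constructor
      · intro h; subst h; rw [hce] at hd; exact (List.cons.injEq _ _ _ _ ▸ hd).1
      · intro h; subst h
        exact String.toList_inj.mp (by rw [hce, hd])
    simp only [pvChars, List.flatMap_cons, hce] at *
    rw [List.count_append, List.count_cons, List.count_cons]
    rw [ihr]
    by_cases h : ce = c
    · simp [h, hiff.mpr h]; omega
    · have : ¬ (e = d) := fun he => h (hiff.mp he)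
      simp [h, this]

theorem pv_chars_mem {lst : List String} (hs : pvSingle lst) {c : Char}
    (hc : c ∈ pvChars lst) : ∃ d ∈ lst, d.toList = [c] := by
  obtain ⟨e, he, hce⟩ := List.mem_flatMap.mp hc
  obtain ⟨c', hc'⟩ := hs e he
  rw [hc'] at hce
  rcases List.mem_singleton.mp hce with rfl
  exact ⟨e, he, hc'⟩

-- bounds imply the word is no longer than the input
theorem pv_bounds_length {lst : List String} (hs : pvSingle lst) {s : List Char}
    (hb : pvBounds lst s) : s.length ≤ lst.length := by
  have hle : (s : Multiset Char) ≤ (pvChars lst : Multiset Char) := by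
    rw [Multiset.le_iff_count]
    intro c
    simpa using hb c
  have := Multiset.card_le_card hle
  simpa [pv_chars_length hs] using this

-- decomposition of the char population at a member
theorem pv_chars_erase {lst : List String} {e : String} (he : e ∈ lst) (c : Char) :
    (pvChars lst).count c = e.toList.count c + (pvChars (lst.erase e)).count c := by
  have hp : lst.Perm (e :: lst.erase e) := List.perm_cons_erase he
  have hp' : (pvChars lst).Perm (pvChars (e :: lst.erase e)) :=
    List.Perm.flatMap hp (fun a _ => List.Perm.refl _)
  rw [hp'.count_eq]
  simp [pvChars, List.count_append]

-- A's reachable words are exactly the nonempty words within the char bounds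
theorem pv_SR_mp {cur s : List Char} {rem : List String} (h : pvSR cur rem s) :
    pvSingle rem → ∃ t, s = cur ++ t ∧ t ≠ [] ∧ ∀ c, t.count c ≤ (pvChars rem).count c := by
  induction h with
  | base e he =>
    intro hs
    obtain ⟨c, hc⟩ := hs e he
    refine ⟨e.toList, rfl, by simp [hc], ?_⟩
    intro c'
    rw [pv_chars_erase he c']
    omega
  | step e he h ih =>
    intro hs
    obtain ⟨t, rfl, hne, hb⟩ := ih (fun e' he' => hs e' (List.mem_of_mem_erase he'))
    refine ⟨e.toList ++ t, by rw [List.append_assoc], by simp [hne], ?_⟩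
    intro c
    rw [pv_chars_erase he c, List.count_append]
    exact Nat.add_le_add le_rfl (hb c)

theorem pv_SR_mpr : ∀ (t : List Char), ∀ (rem : List String) (cur : List Char),
    pvSingle rem → t ≠ [] → (∀ c, t.count c ≤ (pvChars rem).count c) →
    pvSR cur rem (cur ++ t) := by
  intro t
  induction t with
  | nil => intro _ _ _ h; exact absurd rfl h
  | cons c t' ih =>
    intro rem cur hs _ hb
    have hpos : 1 ≤ (pvChars rem).count c := by
      have := hb c
      simp at this
      omega
    have hcmem : c ∈ pvChars rem := List.one_le_count_iff.mp hpos
    obtain ⟨e, he, hec⟩ := pv_chars_mem hs hcmem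
    cases t' with
    | nil =>
      have : cur ++ [c] = cur ++ e.toList := by rw [hec]
      rw [this]
      exact pvSR.base e he
    | cons c2 t2 =>
      have hstep : pvSR (cur ++ e.toList) (rem.erase e) ((cur ++ e.toList) ++ (c2 :: t2)) := by
        apply ih (rem.erase e) (cur ++ e.toList)
        · exact fun e' he' => hs e' (List.mem_of_mem_erase he')
        · simp
        · intro c'
          have hdec := pv_chars_erase he c'
          have hbc := hb c'
          rw [hec] at hdec
          simp only [List.count_cons] at hdec hbc ⊢
          by_cases hcc : c' = c
          · subst hcc
            simp at hdec hbc ⊢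
            omega
          · simp [Ne.symm hcc] at hdec hbc ⊢
            omega
      have : cur ++ (c :: c2 :: t2) = (cur ++ e.toList) ++ (c2 :: t2) := by
        rw [hec, List.append_assoc]; rfl
      rw [this] at *
      exact pvSR.step e he hstep

-- the Counter built by B's first loop
theorem pv_counts_items (lst : List String) :
    (pvCounts lst).items = (PySem.Set.ofList lst).map (fun k => (k, (lst.count k : Int))) := by
  have : pvCounts lst = PySem.Dict.counter lst :=
    PySem.Dict.foldl_insert_getD_add_one_eq_counter lst
  rw [this, PySem.Dict.items_counter]

-- one level step: from words of length m to words of length m+1, inside the bounds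
theorem pv_level_invariant {lst : List String} (hs : pvSingle lst) : ∀ (m : Nat),
    (∀ s, s ∈ ((List.range m).foldl (fun st _ => pvStepB (pvCounts lst) st)
        ([], PySem.Set.ofList [[]])).2 ↔ s.length = m ∧ pvBounds lst s) ∧
    (∀ s, s ∈ ((List.range m).foldl (fun st _ => pvStepB (pvCounts lst) st)
        ([], PySem.Set.ofList [[]])).1 ↔ 1 ≤ s.length ∧ s.length ≤ m ∧ pvBounds lst s) := by
  intro m
  induction m with
  | zero =>
    constructor
    · intro s
      show s ∈ PySem.Set.ofList [[]] ↔ _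
      rw [PySem.Set.mem_ofList]
      simp only [List.mem_singleton]
      constructor
      · rintro rfl
        exact ⟨rfl, fun c => by simp⟩
      · rintro ⟨h, -⟩
        exact List.length_eq_zero_iff.mp h
    · intro s
      show s ∈ ([] : List (List Char)) ↔ _
      simp only [List.not_mem_nil, false_iff]
      rintro ⟨h1, h2, -⟩
      omega
  | succ m ih =>
    obtain ⟨ih2, ih1⟩ := ih
    rw [List.range_succ]
    simp only [List.foldl_append, List.foldl_cons, List.foldl_nil]
    set st := (List.range m).foldl (fun st _ => pvStepB (pvCounts lst) st)
        ([], PySem.Set.ofList [[]]) with hst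
    have hnxt : ∀ s, s ∈ (pvStepB (pvCounts lst) st).2 ↔
        s.length = m + 1 ∧ pvBounds lst s := by
      intro s
      show s ∈ st.2.foldl _ PySem.Set.empty ↔ _
      rw [pv_outer_mem]
      simp only [PySem.Set.empty]
      constructor
      · rintro (hs0 | ⟨w, hw, dc, hdc, hcond, rfl⟩)
        · simp at hs0
        · obtain ⟨hwlen, hwb⟩ := (ih2 w).mp hw
          rw [pv_counts_items] at hdc
          obtain ⟨d, hd, rfl⟩ := List.mem_map.mp hdc
          have hdmem : d ∈ lst := (PySem.Set.mem_ofList lst d).mp hd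
          obtain ⟨c, hc⟩ := hs d hdmem
          simp only at hcond
          rw [hc] at hcond ⊢
          rw [pv_count_single] at hcond
          have hcount : w.count c < lst.count d := by exact_mod_cast hcond
          constructor
          · simp [hwlen]
          · intro c'
            rw [List.count_append]
            by_cases hcc : c' = c
            · subst hcc
              have := pv_chars_count hs hc (lst := lst)
              simp [this]
              omega
            · have := hwb c'
              simp [Ne.symm hcc]
              omega
      · rintro ⟨hlen, hb⟩
        have hne : s ≠ [] := by
          intro h; rw [h] at hlen; simp at hlen
        refine Or.inr ⟨s.dropLast, ?_, ?_⟩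
        · apply (ih2 s.dropLast).mpr
          constructor
          · have hdl : s.dropLast.length = s.length - 1 := List.length_dropLast
            omega
          · intro c
            calc s.dropLast.count c ≤ s.count c := (List.dropLast_sublist s).count_le c
              _ ≤ _ := hb c
        · set c := s.getLast hne with hcdef
          have hsplit : s.dropLast ++ [c] = s := List.dropLast_append_getLast hne
          have hcnt : s.count c = s.dropLast.count c + 1 := by
            conv_lhs => rw [← hsplit]
            simp [List.count_append]
          have hcpos : 1 ≤ (pvChars lst).count c := by
            have := hb c
            omega
          obtain ⟨d, hd, hdc⟩ := pv_chars_mem hs (List.one_le_count_iff.mp hcpos)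
          refine ⟨(d, (lst.count d : Int)), ?_, ?_, ?_⟩
          · rw [pv_counts_items]
            exact List.mem_map.mpr ⟨d, (PySem.Set.mem_ofList lst d).mpr hd, rfl⟩
          · simp only
            rw [hdc, pv_count_single]
            have hbc := hb c
            rw [pv_chars_count hs hdc] at hbc
            have : s.dropLast.count c < lst.count d := by omega
            exact_mod_cast this
          · simp only
            rw [hdc, hsplit]
    constructor
    · exact hnxt
    · intro s
      rw [show (pvStepB (pvCounts lst) st).1 = st.1 ++ (pvStepB (pvCounts lst) st).2 from rfl]
      rw [List.mem_append, ih1 s, hnxt s]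
      constructor
      · rintro (⟨h1, h2, h3⟩ | ⟨h1, h2⟩)
        · exact ⟨h1, by omega, h3⟩
        · exact ⟨by omega, by omega, h2⟩
      · rintro ⟨h1, h2, h3⟩
        by_cases hm : s.length ≤ m
        · exact Or.inl ⟨h1, hm, h3⟩
        · exact Or.inr ⟨by omega, h3⟩

-- two collections with the same members yield the same sorted list of distinct int values
theorem pv_sorted_congr {l1 l2 : List (List Char)} (h : ∀ s, s ∈ l1 ↔ s ∈ l2) :
    PySem.List.sorted (PySem.Set.ofList (l1.map pvInt)) (fun x => x) false =
      PySem.List.sorted (PySem.Set.ofList (l2.map pvInt)) (fun x => x) false := by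
  apply (PySem.List.sorted_id_eq_sorted_id_iff_perm _ _).mpr
  apply (List.perm_ext_iff_of_nodup (PySem.Set.nodup_ofList _) (PySem.Set.nodup_ofList _)).mpr
  intro x
  simp only [PySem.Set.mem_ofList, List.mem_map]
  constructor
  · rintro ⟨a, ha, rfl⟩; exact ⟨a, (h a).mp ha, rfl⟩
  · rintro ⟨a, ha, rfl⟩; exact ⟨a, (h a).mpr ha, rfl⟩

-- ===== VERDICT (by name: the statement is the Claim_ definition above) =====
theorem sort_lst_spec : Claim_equal_sort_lst := by
  intro lst _
  unfold Spec_sort_lst sort_lst sort_lst_alt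
  by_cases hv : (lst.all (fun element =>
      PySem.Str.strIsdigit element && !(decide ((1 : Int) < PySem.Str.len element)))) = true
  · rw [if_pos hv, if_pos hv]
    have hs : pvSingle lst := by
      intro e he
      have hall := List.all_eq_true.mp hv e he
      have hd : PySem.Str.strIsdigit e = true := by
        cases hb : PySem.Str.strIsdigit e
        · rw [hb] at hall; simp at hall
        · rfl
      have hlen : ¬ ((1 : Int) < PySem.Str.len e) := by
        simp only [Bool.and_eq_true, Bool.not_eq_true', decide_eq_false_iff_not] at hall
        exact hall.2
      have hle : e.toList.length ≤ 1 := by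
        rw [PySem.Str.len_eq] at hlen
        exact_mod_cast Int.not_lt.mp hlen
      have hne : e.toList ≠ [] := by
        intro hnil
        rw [PySem.Str.strIsdigit_eq, hnil] at hd
        simp [PySem.Chars.strIsdigit] at hd
      have : e.toList.length = 1 := by
        have := List.length_pos_of_ne_nil hne
        omega
      exact List.length_eq_one_iff.mp this
    have hne : ∀ e ∈ lst, e.toList ≠ [] := by
      intro e he
      obtain ⟨c, hc⟩ := hs e he
      simp [hc]
    apply congrArg
    apply pv_sorted_congr
    intro s
    have hA := (pv_memA lst.length lst (le_refl _) hne).2 [] [] s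
    have hB := (pv_level_invariant hs lst.length).2 s
    rw [hA]
    show _ ↔ s ∈ ((List.range lst.length).foldl (fun st _ => pvStepB (pvCounts lst) st)
        ([], PySem.Set.ofList [[]])).1
    rw [hB]
    constructor
    · rintro (h0 | ⟨hc, -⟩ | hsr)
      · simp at h0
      · exact absurd rfl hc
      · obtain ⟨t, rfl, htne, htb⟩ := pv_SR_mp hsr hs
        refine ⟨?_, ?_, htb⟩
        · have := List.length_pos_of_ne_nil htne; omega
        · exact pv_bounds_length hs htb
    · rintro ⟨h1, h2, h3⟩
      have hne' : s ≠ [] := by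
        intro h; rw [h] at h1; simp at h1
      have := pv_SR_mpr s lst [] hs hne' h3
      simpa using this
  · rw [if_neg hv, if_neg hv]
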